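-- pv_equiv track=rewrite | github.com/Metalrasputian/PyDiceHelper | DiceGameExample.py | determine_hits
-- ===== SOURCE A (Python) =====
-- def determine_hits(pool):
--
--     hits = 0
--     misses = 0
--     crits = 0
--
--     for die in pool:
--         if die == "*":
--             hits +=1
--         elif die == "**":
--             hits += 2
--         elif die == "$":
--             crits += 1
--         else:
--             misses += 1
--
--     return (hits, misses, crits)
-- ===== SOURCE B (Python) =====
-- def determine_hits(pool):
--     # Staged whole-list passes: count each special symbol with list.count,
--     # then derive misses by subtraction. No per-element branching loop.
--     singles = pool.count("*")
--     doubles = pool.count("**")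
--     crits = pool.count("$")
--     return (singles + 2 * doubles, len(pool) - singles - doubles - crits, crits)
-- ===== Notes on version B (the rewrite author's own statement) =====
-- stated objective: idiomatic
-- what changed: B replaces A's single branching loop with three accumulators by staged whole-list list.count passes per symbol plus arithmetic (misses by subtraction from len), eliminating the per-element dispatch entirely.
import Mathlib
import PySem

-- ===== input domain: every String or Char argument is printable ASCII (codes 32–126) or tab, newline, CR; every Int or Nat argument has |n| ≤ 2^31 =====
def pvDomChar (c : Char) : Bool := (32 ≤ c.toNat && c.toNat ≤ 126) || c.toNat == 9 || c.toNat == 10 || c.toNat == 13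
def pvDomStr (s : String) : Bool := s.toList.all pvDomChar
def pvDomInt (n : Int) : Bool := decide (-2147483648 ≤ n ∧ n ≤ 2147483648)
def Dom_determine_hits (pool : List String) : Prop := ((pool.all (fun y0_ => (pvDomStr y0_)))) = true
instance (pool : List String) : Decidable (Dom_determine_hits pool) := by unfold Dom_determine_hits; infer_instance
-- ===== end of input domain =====

-- B derives the triple from staged whole-list count passes instead of A's branching accumulator loop; equivalence over the return value.

-- ===== PORT A =====
-- literal transliteration of A's loop over pool with three accumulators
def determine_hits (pool : List String) : Int × Int × Int :=
  let st := pool.foldl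
    (fun (acc : Int × Int × Int) die =>
      let (hits, misses, crits) := acc
      if die = "*" then (hits + 1, misses, crits)
      else if die = "**" then (hits + 2, misses, crits)
      else if die = "$" then (hits, misses, crits + 1)
      else (hits, misses + 1, crits))
    (0, 0, 0)
  (st.1, st.2.1, st.2.2)

-- ===== PORT B =====
-- staged pool.count passes and arithmetic, as in Source B
def determine_hits_alt (pool : List String) : Int × Int × Int :=
  let singles : Int := PySem.List.count pool "*"
  let doubles : Int := PySem.List.count pool "**"
  let crits : Int := PySem.List.count pool "$"
  (singles + 2 * doubles, (pool.length : Int) - singles - doubles - crits, crits)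

-- ===== PRECONDITION & SPEC =====
def Spec_determine_hits (pool : List String) (out : Int × Int × Int) : Prop := out = determine_hits_alt pool
instance (pool : List String) (out : Int × Int × Int) : Decidable (Spec_determine_hits pool out) := by unfold Spec_determine_hits; infer_instance

-- ===== CLAIM (what is proved, stated in full; the proofs are below) =====
def Claim_equal_determine_hits : Prop := ∀ (pool : List String), Dom_determine_hits pool → Spec_determine_hits pool (determine_hits pool)

-- ===== LEMMAS AND PROOFS =====

-- ===== VERDICT (by name: the statement is the Claim_ definition above) =====
-- A's accumulator characterised by counts over the processed list
theorem determine_hits_foldl_char (pool : List String) (h m c : Int) :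
    pool.foldl
      (fun (acc : Int × Int × Int) die =>
        let (hits, misses, crits) := acc
        if die = "*" then (hits + 1, misses, crits)
        else if die = "**" then (hits + 2, misses, crits)
        else if die = "$" then (hits, misses, crits + 1)
        else (hits, misses + 1, crits))
      (h, m, c)
    = (h + (pool.count "*" : Int) + 2 * (pool.count "**" : Int),
       m + (pool.length : Int) - (pool.count "*" : Int) - (pool.count "**" : Int) - (pool.count "$" : Int),
       c + (pool.count "$" : Int)) := by
  induction pool generalizing h m c with
  | nil => simp
  | cons x xs ih =>
    simp only [List.foldl_cons]
    by_cases h1 : x = "*"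
    · subst h1; rw [if_pos rfl, ih]; simp; constructor <;> ring
    · rw [if_neg h1]
      by_cases h2 : x = "**"
      · subst h2; rw [if_pos rfl, ih]; simp [h1]; constructor <;> ring
      · rw [if_neg h2]
        by_cases h3 : x = "$"
        · subst h3; rw [if_pos rfl, ih]; simp [h1, h2]; constructor <;> ring
        · rw [if_neg h3, ih]; simp [h1, h2, h3]; ring

theorem determine_hits_spec : Claim_equal_determine_hits := by
  intro pool _
  unfold Spec_determine_hits determine_hits determine_hits_alt
  simp only [determine_hits_foldl_char, PySem.List.count_eq]
  simp
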